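-- pv_equiv track=rewrite | github.com/chimtrangbu/hyperspace | trainingday03/lycos/lycos.py | generate_autocomplete
-- ===== SOURCE A (Python) =====
-- def generate_autocomplete(words):
--     res = {}
--     keys = []
--     for x in words:
--         for i in range(len(x)):
--             if x[:i + 1] not in keys:
--                 keys.append(x[:i + 1])
--     for x in keys:
--         for y in words:
--             if (y.startswith(x)):
--                 if x not in res.keys():
--                     res[x] = {y}
--                 else:
--                     res[x].add(y)
--     return res
-- ===== SOURCE B (Python) =====
-- def generate_autocomplete(words):
--     res = {}
--     for y in words:
--         for i in range(len(y)):
--             p = y[:i + 1]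
--             if p in res:
--                 res[p].add(y)
--             else:
--                 res[p] = {y}
--     return res
-- ===== Notes on version B (the rewrite author's own statement) =====
-- stated objective: faster
-- what changed: Single pass over the words: each word is added directly to res[prefix] for each of its prefixes, removing A's global keys list with its linear membership scans and A's second keys-times-words nested scan.
import Mathlib
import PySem

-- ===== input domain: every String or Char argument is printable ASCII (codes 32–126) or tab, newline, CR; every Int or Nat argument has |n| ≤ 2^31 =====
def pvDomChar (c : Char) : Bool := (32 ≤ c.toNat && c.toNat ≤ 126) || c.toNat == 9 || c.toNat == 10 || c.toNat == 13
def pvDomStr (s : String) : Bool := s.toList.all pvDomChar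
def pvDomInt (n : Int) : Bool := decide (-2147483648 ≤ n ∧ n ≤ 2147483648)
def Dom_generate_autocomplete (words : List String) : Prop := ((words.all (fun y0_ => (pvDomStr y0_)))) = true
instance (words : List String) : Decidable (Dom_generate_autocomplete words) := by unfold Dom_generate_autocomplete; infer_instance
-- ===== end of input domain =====

-- B builds the prefix map in one pass over the words (add each word to res[prefix] for each of its
-- prefixes) instead of A's global keys list with linear membership scans plus a second keys×words scan.

-- ===== PORT A =====
def generate_autocomplete (words : List String) : List (String × List String) :=
  let keys := words.foldl (fun keys x =>
      (PySem.List.pyRange 0 (PySem.Str.len x) 1).foldl (fun keys i =>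
        if keys.contains (PySem.Str.slice x none (some (i + 1))) then keys
        else keys ++ [PySem.Str.slice x none (some (i + 1))]) keys) ([] : List String)
  let res := keys.foldl (fun res x =>
      words.foldl (fun res y =>
        if PySem.Str.startswith y x then
          (if res.contains x = false then res.insert x (PySem.Set.ofList [y])
           else res.modify x PySem.Set.empty (fun s => PySem.Set.add s y))
        else res) res) (PySem.Dict.empty : PySem.Dict String (PySem.Set String))
  res.items

-- ===== PORT B =====
def generate_autocomplete_alt (words : List String) : List (String × List String) :=
  (words.foldl (fun res y =>
      (PySem.List.pyRange 0 (PySem.Str.len y) 1).foldl (fun res i =>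
        let p := PySem.Str.slice y none (some (i + 1))
        if res.contains p then res.modify p PySem.Set.empty (fun s => PySem.Set.add s y)
        else res.insert p (PySem.Set.ofList [y])) res)
    (PySem.Dict.empty : PySem.Dict String (PySem.Set String))).items

-- ===== PRECONDITION & SPEC =====
def Spec_generate_autocomplete (words : List String) (out : List (String × List String)) : Prop := out = generate_autocomplete_alt words
instance (words : List String) (out : List (String × List String)) : Decidable (Spec_generate_autocomplete words out) := by unfold Spec_generate_autocomplete; infer_instance

-- ===== CLAIM (what is proved, stated in full; the proofs are below) =====
def Claim_equal_generate_autocomplete : Prop := ∀ (words : List String), Dom_generate_autocomplete words → Spec_generate_autocomplete words (generate_autocomplete words)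

-- ===== LEMMAS AND PROOFS =====

-- keys of an association list
def keysOf (L : List (String × PySem.Set String)) : List String := L.map Prod.fst

-- the nonempty prefixes of y, shortest first (what both inner slice loops enumerate)
def prefsP (y : String) : List String :=
  (PySem.List.pyRange 0 (PySem.Str.len y) 1).map (fun i => PySem.Str.slice y none (some (i + 1)))

-- running set of the words in ws that start with x, seeded with s0
def matchP (x : String) (s0 : PySem.Set String) (ws : List String) : PySem.Set String :=
  ws.foldl (fun s y => if PySem.Str.startswith y x then PySem.Set.add s y else s) s0

-- the common canonical value of both ports
def canonP (words : List String) : List (String × List String) :=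
  (PySem.Set.ofList (words.flatMap prefsP)).map (fun p => (p, matchP p PySem.Set.empty words))

-- the shared per-(word, prefix) dictionary update both ports perform
def opP (y : String) (d : PySem.Dict String (PySem.Set String)) (p : String) : PySem.Dict String (PySem.Set String) :=
  if d.contains p then d.modify p PySem.Set.empty (fun s => PySem.Set.add s y)
  else d.insert p (PySem.Set.ofList [y])



lemma prefsP_eq (y : String) :
    prefsP y = (List.range y.toList.length).map (fun k => String.ofList (y.toList.take (k + 1))) := by
  unfold prefsP
  rw [PySem.List.pyRange_one, List.map_map]
  have hlen : PySem.Str.len y = (y.toList.length : Int) := by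
    simp [PySem.Str.len]
  rw [hlen]
  simp only [Int.sub_zero, Int.toNat_natCast]
  apply List.map_congr_left
  intro k hk
  simp only [Function.comp_apply, zero_add, PySem.Str.slice, PySem.Chars.slice_eq_listSlice]
  have hcast : ((k : Int) + 1) = ((k + 1 : Nat) : Int) := by push_cast; ring
  rw [hcast, PySem.List.slice_to_natCast]

lemma mem_prefsP (q y : String) : q ∈ prefsP y ↔ q.toList ≠ [] ∧ q.toList <+: y.toList := by
  rw [prefsP_eq]
  constructor
  · intro hq
    rcases List.mem_map.1 hq with ⟨k, hk, rfl⟩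
    rw [List.mem_range] at hk
    refine ⟨?_, ?_⟩
    · rw [String.toList_ofList]
      intro h
      have hlen : (List.take (k + 1) y.toList).length = 0 := by rw [h]; rfl
      rw [List.length_take] at hlen
      omega
    · rw [String.toList_ofList]
      exact List.take_prefix _ _
  · rintro ⟨hne, hpre⟩
    apply List.mem_map.2
    have hlen0 : q.toList.length ≠ 0 := by simpa using hne
    refine ⟨q.toList.length - 1, ?_, ?_⟩
    · rw [List.mem_range]
      have := hpre.length_le
      omega
    · have h1 : q.toList.length - 1 + 1 = q.toList.length := by omega
      rw [h1, ← List.prefix_iff_eq_take.1 hpre]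
      exact String.ofList_toList

lemma nodup_prefsP (y : String) : (prefsP y).Nodup := by
  rw [prefsP_eq]
  refine List.Nodup.map_on ?_ (List.nodup_range)
  intro a ha b hb hfe
  rw [List.mem_range] at ha hb
  have hlen := congrArg (fun s : String => s.toList.length) hfe
  simp only [String.toList_ofList, List.length_take] at hlen
  omega

lemma startswith_iff' (y q : String) : PySem.Str.startswith y q = true ↔ q.toList <+: y.toList := by
  show PySem.Chars.startswith y.toList q.toList = true ↔ _
  exact PySem.Chars.startswith_iff _ _

lemma startswith_mem_prefsP (p y : String) (hp : p.toList ≠ []) :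
    PySem.Str.startswith y p = true ↔ p ∈ prefsP y := by
  rw [mem_prefsP, startswith_iff']; tauto

lemma set_add_empty (y : String) : PySem.Set.add PySem.Set.empty y = [y] := by
  rw [PySem.Set.add_eq_ite]
  simp [PySem.Set.empty]

lemma set_ofList_singleton (y : String) : PySem.Set.ofList [y] = [y] := by
  rfl

lemma contains_mk_iff (L : List (String × PySem.Set String)) (p : String) :
    (PySem.Dict.mk L).contains p = true ↔ p ∈ keysOf L := by
  show (L.any fun pr => pr.1 == p) = true ↔ p ∈ keysOf L
  unfold keysOf
  constructor
  · intro h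
    rcases List.any_eq_true.1 h with ⟨pr, hm, hb⟩
    exact List.mem_map.2 ⟨pr, hm, beq_iff_eq.1 hb⟩
  · intro h
    rcases List.mem_map.1 h with ⟨pr, hm, he⟩
    exact List.any_eq_true.2 ⟨pr, hm, beq_iff_eq.2 he⟩

lemma contains_mk_false (L : List (String × PySem.Set String)) (p : String) (h : p ∉ keysOf L) :
    (PySem.Dict.mk L).contains p = false := by
  cases hb : (PySem.Dict.mk L).contains p
  · rfl
  · exact absurd ((contains_mk_iff L p).1 hb) h

lemma op_insert (y p : String) (L : List (String × PySem.Set String)) (h : p ∉ keysOf L) :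
    opP y (PySem.Dict.mk L) p = PySem.Dict.mk (L ++ [(p, [y])]) := by
  have hc := contains_mk_false L p h
  unfold opP
  rw [hc]
  simp only [Bool.false_eq_true, if_false]
  show PySem.Dict.insert _ p (PySem.Set.ofList [y]) = _
  rw [set_ofList_singleton]
  simp [PySem.Dict.insert, hc]

lemma op_modify (y p : String) (s : PySem.Set String) (pre suf : List (String × PySem.Set String))
    (h1 : p ∉ keysOf pre) (h2 : p ∉ keysOf suf) :
    opP y (PySem.Dict.mk (pre ++ (p, s) :: suf)) p = PySem.Dict.mk (pre ++ (p, PySem.Set.add s y) :: suf) := by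
  have hc : (PySem.Dict.mk (pre ++ (p, s) :: suf)).contains p = true := by
    rw [contains_mk_iff]
    unfold keysOf
    simp
  unfold opP
  rw [hc]
  simp only [if_true]
  have hg : (PySem.Dict.mk (pre ++ (p, s) :: suf)).getD p PySem.Set.empty = s := by
    unfold PySem.Dict.getD PySem.Dict.get?
    show (Option.map _ (List.find? (fun pr => pr.1 == p) (pre ++ (p, s) :: suf))).getD _ = s
    rw [List.find?_append]
    have hpre : pre.find? (fun pr => pr.1 == p) = none := by
      apply List.find?_eq_none.2
      intro pr hm
      simp only [beq_iff_eq]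
      intro he
      exact h1 (List.mem_map.2 ⟨pr, hm, he⟩)
    rw [hpre]
    simp
  unfold PySem.Dict.modify
  rw [hg]
  simp only [PySem.Dict.insert, hc, if_true]
  congr 1
  show (pre ++ (p, s) :: suf).map (fun q => if q.1 == p then (p, PySem.Set.add s y) else q) = _
  rw [List.map_append, List.map_cons]
  have hid : ∀ (l : List (String × PySem.Set String)), p ∉ keysOf l →
      l.map (fun q => if q.1 == p then (p, PySem.Set.add s y) else q) = l := by
    intro l hl
    have hpt : ∀ q ∈ l, (if q.1 == p then (p, PySem.Set.add s y) else q) = q := by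
      intro q hq
      have hne : (q.1 == p) = false :=
        beq_eq_false_iff_ne.2 (fun he => hl (List.mem_map.2 ⟨q, hq, he⟩))
      simp [hne]
    rw [List.map_congr_left hpt]
    simp
  rw [hid pre h1, hid suf h2]
  simp

lemma keysOf_append (L M : List (String × PySem.Set String)) :
    keysOf (L ++ M) = keysOf L ++ keysOf M := by
  unfold keysOf; rw [List.map_append]

lemma foldl_opP (y : String) : ∀ (ps : List String) (L : List (String × PySem.Set String)),
    ps.Nodup → (keysOf L).Nodup →
    (ps.foldl (opP y) (PySem.Dict.mk L)).items =
      L.map (fun pr => if pr.1 ∈ ps then (pr.1, PySem.Set.add pr.2 y) else pr)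
      ++ (ps.filter (fun p => decide (p ∉ keysOf L))).map (fun p => (p, ([y] : PySem.Set String))) := by
  intro ps
  induction ps with
  | nil =>
    intro L _ _
    simp
  | cons p ps ih =>
    intro L hnd hK
    obtain ⟨hp_ps, hps⟩ := List.nodup_cons.1 hnd
    rw [List.foldl_cons]
    by_cases hp : p ∈ keysOf L
    · rcases List.mem_map.1 hp with ⟨pr, hmem, hfst⟩
      obtain ⟨p1, s⟩ := pr
      simp only at hfst
      subst hfst
      rcases List.append_of_mem hmem with ⟨pre, suf, hL⟩
      subst hL
      have hKsplit : keysOf (pre ++ (p1, s) :: suf) = keysOf pre ++ p1 :: keysOf suf := by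
        unfold keysOf; simp
      have hK' : (keysOf pre ++ p1 :: keysOf suf).Nodup := by rw [← hKsplit]; exact hK
      have hmid := List.nodup_middle.1 hK'
      have hnm := (List.nodup_cons.1 hmid).1
      have hpre : p1 ∉ keysOf pre := fun hm' => hnm (List.mem_append.2 (Or.inl hm'))
      have hsuf : p1 ∉ keysOf suf := fun hm' => hnm (List.mem_append.2 (Or.inr hm'))
      have hK2 : keysOf (pre ++ (p1, PySem.Set.add s y) :: suf) = keysOf (pre ++ (p1, s) :: suf) := by
        unfold keysOf; simp
      have hmaps : ∀ (l : List (String × PySem.Set String)), p1 ∉ keysOf l →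
          l.map (fun pr => if pr.1 ∈ ps then (pr.1, PySem.Set.add pr.2 y) else pr)
          = l.map (fun pr => if pr.1 ∈ p1 :: ps then (pr.1, PySem.Set.add pr.2 y) else pr) := by
        intro l hl
        apply List.map_congr_left
        intro pr hpr
        have hne : pr.1 ≠ p1 := fun he => hl (List.mem_map.2 ⟨pr, hpr, he⟩)
        by_cases hmem2 : pr.1 ∈ ps
        · rw [if_pos hmem2, if_pos (List.mem_cons_of_mem _ hmem2)]
        · rw [if_neg hmem2, if_neg (by simp [List.mem_cons, hne, hmem2])]
      rw [op_modify y p1 s pre suf hpre hsuf]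
      rw [ih _ hps (by rw [hK2]; exact hK), hK2]
      rw [List.map_append, List.map_append, List.map_cons, List.map_cons]
      rw [hmaps pre hpre, hmaps suf hsuf]
      rw [List.filter_cons]
      have hdec : decide (p1 ∉ keysOf (pre ++ (p1, s) :: suf)) = false := by simp [hp]
      rw [hdec]
      simp [hp_ps]
    · rw [op_insert y p L hp]
      have hkeys' : keysOf (L ++ [(p, [y])]) = keysOf L ++ [p] := by
        rw [keysOf_append]; rfl
      have hKnd' : (keysOf (L ++ [(p, [y])])).Nodup := by
        rw [hkeys', show keysOf L ++ [p] = keysOf L ++ p :: [] from rfl, List.nodup_middle]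
        exact List.nodup_cons.2 ⟨by simpa using hp, by simpa using hK⟩
      rw [ih _ hps hKnd']
      rw [List.map_append]
      have hmapL : L.map (fun pr => if pr.1 ∈ ps then (pr.1, PySem.Set.add pr.2 y) else pr)
          = L.map (fun pr => if pr.1 ∈ p :: ps then (pr.1, PySem.Set.add pr.2 y) else pr) := by
        apply List.map_congr_left
        intro pr hpr
        have hne : pr.1 ≠ p := fun he => hp (List.mem_map.2 ⟨pr, hpr, he⟩)
        by_cases hmem2 : pr.1 ∈ ps
        · rw [if_pos hmem2, if_pos (List.mem_cons_of_mem _ hmem2)]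
        · rw [if_neg hmem2, if_neg (by simp [List.mem_cons, hne, hmem2])]
      have hsingle : ([(p, ([y] : PySem.Set String))]).map
          (fun pr => if pr.1 ∈ ps then (pr.1, PySem.Set.add pr.2 y) else pr) = [(p, [y])] := by
        simp [hp_ps]
      have hfilter : ps.filter (fun q => decide (q ∉ keysOf (L ++ [(p, [y])])))
          = ps.filter (fun q => decide (q ∉ keysOf L)) := by
        apply List.filter_congr
        intro q hq
        have hne : q ≠ p := fun he => hp_ps (he ▸ hq)
        rw [hkeys']
        simp [List.mem_append, hne]
      rw [hmapL, hsingle, hfilter, List.filter_cons]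
      have hdec : (decide (p ∉ keysOf L)) = true := by simp [hp]
      rw [hdec]
      simp

lemma innerA_items2 (x : String) (ws : List String) :
    ∀ (s : PySem.Set String) (pre suf : List (String × PySem.Set String)),
    x ∉ keysOf pre → x ∉ keysOf suf →
    (ws.foldl (fun res y => if PySem.Str.startswith y x then opP y res x else res)
        (PySem.Dict.mk (pre ++ (x, s) :: suf)))
      = PySem.Dict.mk (pre ++ (x, matchP x s ws) :: suf) := by
  induction ws with
  | nil => intro s pre suf _ _; simp [matchP]
  | cons y ws ih =>
    intro s pre suf h1 h2
    rw [List.foldl_cons]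
    by_cases hy : PySem.Str.startswith y x = true
    · rw [if_pos hy, op_modify y x s pre suf h1 h2, ih _ pre suf h1 h2]
      have hm : matchP x s (y :: ws) = matchP x (PySem.Set.add s y) ws := by
        unfold matchP
        rw [List.foldl_cons, if_pos hy]
      rw [hm]
    · rw [if_neg hy, ih s pre suf h1 h2]
      have hm : matchP x s (y :: ws) = matchP x s ws := by
        unfold matchP
        rw [List.foldl_cons, if_neg hy]
      rw [hm]

lemma innerA_items (x : String) (ws : List String) (d : PySem.Dict String (PySem.Set String))
    (h : x ∉ keysOf d.items) :
    (ws.foldl (fun res y => if PySem.Str.startswith y x then opP y res x else res) d).items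
      = if ws.any (fun y => PySem.Str.startswith y x) then
          d.items ++ [(x, matchP x PySem.Set.empty ws)]
        else d.items := by
  induction ws generalizing d with
  | nil => simp
  | cons y ws ih =>
    rw [List.foldl_cons]
    by_cases hy : PySem.Str.startswith y x = true
    · rw [if_pos hy]
      have hd : d = PySem.Dict.mk d.items := rfl
      rw [hd, op_insert y x d.items h]
      have happ : d.items ++ [(x, ([y] : PySem.Set String))] = d.items ++ (x, ([y] : PySem.Set String)) :: [] := rfl
      rw [happ, innerA_items2 x ws [y] d.items [] h (by simp [keysOf])]
      have hany : ((y :: ws).any (fun y => PySem.Str.startswith y x)) = true := by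
        rw [List.any_cons, hy, Bool.true_or]
      rw [hany, if_pos rfl]
      have hm : matchP x PySem.Set.empty (y :: ws) = matchP x [y] ws := by
        unfold matchP
        rw [List.foldl_cons, if_pos hy, set_add_empty]
      rw [hm]
    · rw [if_neg hy, ih d h]
      have hy' : PySem.Str.startswith y x = false := by
        cases hb : PySem.Str.startswith y x
        · rfl
        · exact absurd hb hy
      have hany : ((y :: ws).any (fun y => PySem.Str.startswith y x))
          = (ws.any (fun y => PySem.Str.startswith y x)) := by
        rw [List.any_cons, hy', Bool.false_or]
      have hm : matchP x PySem.Set.empty (y :: ws) = matchP x PySem.Set.empty ws := by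
        unfold matchP
        rw [List.foldl_cons, if_neg hy]
      rw [hany, hm]

lemma phase2 (words : List String) : ∀ (keys : List String) (d : PySem.Dict String (PySem.Set String)),
    keys.Nodup →
    (∀ x ∈ keys, words.any (fun y => PySem.Str.startswith y x) = true) →
    (∀ x ∈ keys, x ∉ keysOf d.items) →
    (keys.foldl (fun res x =>
        words.foldl (fun res y => if PySem.Str.startswith y x then opP y res x else res) res) d).items
      = d.items ++ keys.map (fun x => (x, matchP x PySem.Set.empty words)) := by
  intro keys
  induction keys with
  | nil => intro d _ _ _; simp
  | cons x keys ih =>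
    intro d hnd hmatch hfresh
    obtain ⟨hx_keys, hkeys⟩ := List.nodup_cons.1 hnd
    have hx := innerA_items x words d (hfresh x List.mem_cons_self)
    rw [hmatch x List.mem_cons_self, if_pos rfl] at hx
    have hfresh' : ∀ z ∈ keys,
        z ∉ keysOf (words.foldl (fun res y => if PySem.Str.startswith y x then opP y res x else res) d).items := by
      intro z hz
      rw [hx, keysOf_append]
      intro hmem
      rcases List.mem_append.1 hmem with h1 | h2
      · exact hfresh z (List.mem_cons_of_mem _ hz) h1
      · have hz_eq : z = x := by simpa [keysOf] using h2
        exact hx_keys (hz_eq ▸ hz)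
    rw [List.foldl_cons, ih _ hkeys (fun z hz => hmatch z (List.mem_cons_of_mem _ hz)) hfresh', hx]
    simp

lemma keysA_eq (words : List String) :
    words.foldl (fun keys x =>
      (PySem.List.pyRange 0 (PySem.Str.len x) 1).foldl (fun keys i =>
        if keys.contains (PySem.Str.slice x none (some (i + 1))) then keys
        else keys ++ [PySem.Str.slice x none (some (i + 1))]) keys) ([] : List String)
    = PySem.Set.ofList (words.flatMap prefsP) := by
  have hfun : (fun (keys : List String) (x : String) =>
      (PySem.List.pyRange 0 (PySem.Str.len x) 1).foldl (fun keys i =>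
        if keys.contains (PySem.Str.slice x none (some (i + 1))) then keys
        else keys ++ [PySem.Str.slice x none (some (i + 1))]) keys)
      = (fun keys x => PySem.Set.update keys (prefsP x)) := by
    funext ks x
    show _ = List.foldl PySem.Set.add ks (prefsP x)
    unfold prefsP
    rw [List.foldl_map]
    apply PySem.List.foldl_congr_mem
    intro acc i _
    rw [PySem.Set.add_eq_ite]
    by_cases hm : PySem.Str.slice x none (some (i + 1)) ∈ acc
    · simp [hm]
    · simp [hm]
  rw [hfun]
  induction words using List.reverseRecOn with
  | nil => rfl
  | append_singleton ws y ihw =>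
    rw [List.foldl_append, List.foldl_cons, List.foldl_nil, ihw]
    rw [List.flatMap_append, PySem.Set.ofList_append]
    simp [PySem.Set.update]

lemma no_match_matchP (p : String) (ws : List String)
    (h : ∀ w ∈ ws, PySem.Str.startswith w p = false) (s0 : PySem.Set String) :
    matchP p s0 ws = s0 := by
  unfold matchP
  have h' : ∀ (acc : PySem.Set String) (w : String), w ∈ ws →
      (if PySem.Str.startswith w p then PySem.Set.add acc w else acc) = acc := by
    intro acc w hw
    rw [h w hw]
    simp
  exact (PySem.List.foldl_congr_mem _ _ _ _ h').trans (PySem.List.foldl_ignore _ _)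

lemma mem_keys_nonempty (p : String) (ws : List String)
    (h : p ∈ PySem.Set.ofList (ws.flatMap prefsP)) : p.toList ≠ [] := by
  rcases List.mem_flatMap.1 ((PySem.Set.mem_ofList _ _).1 h) with ⟨w, _, hp⟩
  exact ((mem_prefsP p w).1 hp).1

lemma not_mem_keys_no_match (p : String) (ws : List String) (hp : p.toList ≠ [])
    (h : p ∉ PySem.Set.ofList (ws.flatMap prefsP)) :
    ∀ w ∈ ws, PySem.Str.startswith w p = false := by
  intro w hw
  cases hb : PySem.Str.startswith w p
  · rfl
  · exact absurd ((PySem.Set.mem_ofList _ _).2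
      (List.mem_flatMap.2 ⟨w, hw, (startswith_mem_prefsP p w hp).1 hb⟩)) h

lemma A_eq_canon (words : List String) : generate_autocomplete words = canonP words := by
  unfold generate_autocomplete
  rw [keysA_eq]
  have hfun : (fun (res : PySem.Dict String (PySem.Set String)) (x : String) =>
      words.foldl (fun res y =>
        if PySem.Str.startswith y x then
          (if res.contains x = false then res.insert x (PySem.Set.ofList [y])
           else res.modify x PySem.Set.empty (fun s => PySem.Set.add s y))
        else res) res)
      = (fun res x => words.foldl (fun res y => if PySem.Str.startswith y x then opP y res x else res) res) := by
    funext res x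
    apply PySem.List.foldl_congr_mem
    intro acc y _
    by_cases hy : PySem.Str.startswith y x = true
    · rw [if_pos hy, if_pos hy]
      unfold opP
      cases hc : acc.contains x
      · simp
      · simp
    · rw [if_neg hy, if_neg hy]
  rw [hfun]
  rw [phase2 words _ PySem.Dict.empty (PySem.Set.nodup_ofList _) ?_ ?_]
  · show ((PySem.Dict.empty : PySem.Dict String (PySem.Set String)).items) ++ _ = _
    rfl
  · intro x hx
    rcases List.mem_flatMap.1 ((PySem.Set.mem_ofList _ _).1 hx) with ⟨w, hw, hp⟩
    apply List.any_eq_true.2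
    exact ⟨w, hw, (startswith_mem_prefsP x w ((mem_prefsP x w).1 hp).1).2 hp⟩
  · intro x _
    show x ∉ keysOf (PySem.Dict.empty : PySem.Dict String (PySem.Set String)).items
    simp [keysOf, PySem.Dict.empty]

lemma B_eq_canon (words : List String) : generate_autocomplete_alt words = canonP words := by
  unfold generate_autocomplete_alt
  have hfun : (fun (res : PySem.Dict String (PySem.Set String)) (y : String) =>
      (PySem.List.pyRange 0 (PySem.Str.len y) 1).foldl (fun res i =>
        let p := PySem.Str.slice y none (some (i + 1))
        if res.contains p then res.modify p PySem.Set.empty (fun s => PySem.Set.add s y)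
        else res.insert p (PySem.Set.ofList [y])) res)
      = (fun res y => (prefsP y).foldl (opP y) res) := by
    funext res y
    unfold prefsP
    rw [List.foldl_map]
    rfl
  rw [hfun]
  suffices h : ∀ ws : List String,
      (ws.foldl (fun res y => (prefsP y).foldl (opP y) res) PySem.Dict.empty).items
        = (PySem.Set.ofList (ws.flatMap prefsP)).map (fun p => (p, matchP p PySem.Set.empty ws)) by
    exact h words
  intro ws
  induction ws using List.reverseRecOn with
  | nil => rfl
  | append_singleton ws y ihw =>
    rw [List.foldl_append, List.foldl_cons, List.foldl_nil]
    have hd : (ws.foldl (fun res y => (prefsP y).foldl (opP y) res) PySem.Dict.empty)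
        = PySem.Dict.mk ((PySem.Set.ofList (ws.flatMap prefsP)).map (fun p => (p, matchP p PySem.Set.empty ws))) := by
      show PySem.Dict.mk ((ws.foldl (fun res y => (prefsP y).foldl (opP y) res) PySem.Dict.empty).items) = _
      rw [ihw]
    rw [hd]
    have hkeys : keysOf ((PySem.Set.ofList (ws.flatMap prefsP)).map (fun p => (p, matchP p PySem.Set.empty ws)))
        = PySem.Set.ofList (ws.flatMap prefsP) := by
      unfold keysOf
      rw [List.map_map]
      have hcomp : (Prod.fst ∘ fun p => (p, matchP p PySem.Set.empty ws)) = id := by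
        funext p; rfl
      rw [hcomp, List.map_id]
    rw [foldl_opP y (prefsP y) _ (nodup_prefsP y) (by rw [hkeys]; exact PySem.Set.nodup_ofList _)]
    rw [hkeys]
    rw [List.flatMap_append, PySem.Set.ofList_append]
    have hbm : List.flatMap prefsP [y] = prefsP y := by simp
    rw [hbm]
    rw [PySem.Set.update_eq_append_filter]
    rw [PySem.Set.ofList_eq_self_of_nodup (prefsP y) (nodup_prefsP y)]
    rw [List.map_append, List.map_map]
    congr 1
    · apply List.map_congr_left
      intro p hp
      have hpne : p.toList ≠ [] := mem_keys_nonempty p ws hp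
      have hsplit : matchP p PySem.Set.empty (ws ++ [y])
          = if PySem.Str.startswith y p then PySem.Set.add (matchP p PySem.Set.empty ws) y
            else matchP p PySem.Set.empty ws := by
        unfold matchP
        rw [List.foldl_append]
        rfl
      simp only [Function.comp_apply]
      by_cases hmem : p ∈ prefsP y
      · rw [if_pos hmem, hsplit, if_pos ((startswith_mem_prefsP p y hpne).2 hmem)]
      · rw [if_neg hmem, hsplit, if_neg ?_]
        intro hb
        exact hmem ((startswith_mem_prefsP p y hpne).1 hb)
    · have hpredeq : (prefsP y).filter (fun p => decide (p ∉ PySem.Set.ofList (ws.flatMap prefsP)))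
          = (prefsP y).filter (fun q => !PySem.Set.contains (PySem.Set.ofList (ws.flatMap prefsP)) q) := by
        apply List.filter_congr
        intro q _
        by_cases hq : q ∈ PySem.Set.ofList (ws.flatMap prefsP)
        · simp [hq]
        · simp [hq]
      rw [← hpredeq]
      apply List.map_congr_left
      intro p hp
      obtain ⟨hp_prefs, hp_dec⟩ := List.mem_filter.1 hp
      have hp_notK : p ∉ PySem.Set.ofList (ws.flatMap prefsP) := by
        simpa using hp_dec
      have hpne : p.toList ≠ [] := ((mem_prefsP p y).1 hp_prefs).1
      have h0 : matchP p PySem.Set.empty ws = PySem.Set.empty :=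
        no_match_matchP p ws (not_mem_keys_no_match p ws hpne hp_notK) _
      have hsw : PySem.Str.startswith y p = true := (startswith_mem_prefsP p y hpne).2 hp_prefs
      have hval : matchP p PySem.Set.empty (ws ++ [y]) = [y] := by
        unfold matchP
        rw [List.foldl_append]
        show (if PySem.Str.startswith y p then
                PySem.Set.add (List.foldl _ PySem.Set.empty ws) y
              else List.foldl _ PySem.Set.empty ws) = [y]
        rw [if_pos hsw]
        have := h0
        unfold matchP at this
        rw [this, set_add_empty]
      rw [hval]

-- ===== VERDICT (by name: the statement is the Claim_ definition above) =====
theorem generate_autocomplete_spec : Claim_equal_generate_autocomplete := by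
  intro words _
  unfold Spec_generate_autocomplete
  rw [A_eq_canon, B_eq_canon]
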